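-- pv_equiv track=rewrite | github.com/lexsf/OpenSage | src/opensage/agents/opensage_agent.py | _parse_requires_sandboxes_from_markdown
-- ===== SOURCE A (Python) =====
-- def _parse_requires_sandboxes_from_markdown(content: str) -> list[str]:
--     """Parse dependency sandboxes from a SKILL.md '## Requires Sandbox' section.
--
--     This is a best-effort parser used because many SKILL.md files specify
--     dependency requirements in Markdown.
--     """
--     header = "## Requires Sandbox"
--     idx = content.find(header)
--     if idx < 0:
--         return []
--
--     after = content[idx + len(header) :]
--     lines = after.splitlines()
--
--     # Skip initial blank lines.
--     i = 0
--     while i < len(lines) and not lines[i].strip():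
--         i += 1
--
--     sandboxes = set()
--     while i < len(lines):
--         line = lines[i].strip()
--         if not line:
--             i += 1
--             continue
--         if line.startswith("#"):
--             break  # next section
--         if line.startswith("- "):
--             line = line[2:].strip()
--
--         # Common patterns in repo: "fuzz" or "joern, main, neo4j, codeql".
--         for token in line.split(","):
--             token = token.strip()
--             if not token:
--                 continue
--             if token.lower() in ("none", "n/a", "na"):
--                 continue
--             sandboxes.add(token)
--         i += 1
--
--     return sorted(sandboxes)
-- ===== SOURCE B (Python) =====
-- def _insert_unique(xs, t):
--     """Insert t into strictly increasing list xs, keeping it sorted and duplicate-free."""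
--     if not xs:
--         return [t]
--     x = xs[0]
--     if t < x:
--         return [t] + xs
--     if t == x:
--         return xs
--     return [x] + _insert_unique(xs[1:], t)
--
--
-- def _parse_requires_sandboxes_from_markdown(content: str) -> list[str]:
--     """Staged extract-then-transform parser that maintains an ordered,
--     duplicate-free result by recursive sorted insertion (no set, no final sort)."""
--     _, sep, after = content.partition("## Requires Sandbox")
--     if not sep:
--         return []
--     block = []
--     for raw in after.splitlines():
--         s = raw.strip()
--         if s.startswith("#"):
--             break
--         block.append(s[2:].strip() if s.startswith("- ") else s)
--     bad = ("none", "n/a", "na")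
--     tokens = [t for s in block for t in (p.strip() for p in s.split(","))
--               if t and t.lower() not in bad]
--     result = []
--     for t in tokens:
--         result = _insert_unique(result, t)
--     return result
-- ===== Notes on version B (the rewrite author's own statement) =====
-- stated objective: alternative
-- what changed: Replaces A's index/while scan that accumulates a set and sorts it at the end with a staged extract-then-transform pass (section block, then one flattened token stream) whose result is maintained as an ordered duplicate-free list via recursive sorted insertion - no set and no final sort.
import Mathlib
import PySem

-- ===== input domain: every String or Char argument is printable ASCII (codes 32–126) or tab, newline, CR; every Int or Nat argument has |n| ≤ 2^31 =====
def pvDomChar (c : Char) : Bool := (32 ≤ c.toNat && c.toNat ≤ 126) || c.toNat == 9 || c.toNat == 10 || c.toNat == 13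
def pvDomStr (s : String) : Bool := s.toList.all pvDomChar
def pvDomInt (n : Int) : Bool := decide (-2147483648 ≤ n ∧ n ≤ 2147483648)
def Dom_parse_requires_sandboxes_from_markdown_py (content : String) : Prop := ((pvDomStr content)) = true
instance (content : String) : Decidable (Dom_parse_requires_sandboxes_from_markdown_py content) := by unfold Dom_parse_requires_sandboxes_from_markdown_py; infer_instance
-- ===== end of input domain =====

-- B replaces A's index/while scan + set + final sort with a staged extract-then-transform pass that maintains an ordered duplicate-free result by recursive sorted insertion (no set, no final sort); same results, alternative decomposition.


-- s.split(",") — sep is the nonempty literal ",", so split? is always `some`; getD never fires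
def pvSplitComma (s : String) : List String := (PySem.Str.split? s ",").getD []

-- ===== PORT A =====
-- the `for token in line.split(","):` body (strip, skip empties and none/n-a/na, add)
def pvA_inner (toks : List String) (s : PySem.Set String) : PySem.Set String :=
  toks.foldl (fun s tok =>
    if PySem.Str.strip tok = "" then s
    else if ["none", "n/a", "na"].contains (PySem.Str.lower (PySem.Str.strip tok)) then s
    else PySem.Set.add s (PySem.Str.strip tok)) s

-- the first while loop: skip initial blank lines
def pvA_skip : List String → List String
  | [] => []
  | l :: rest => if PySem.Str.strip l = "" then pvA_skip rest else l :: rest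

-- the second while loop over the remaining lines
def pvA_loop : List String → PySem.Set String → PySem.Set String
  | [], s => s
  | l :: rest, s =>
    if PySem.Str.strip l = "" then pvA_loop rest s
    else if PySem.Str.startswith (PySem.Str.strip l) "#" then s
    else
      pvA_loop rest (pvA_inner (pvSplitComma
        (if PySem.Str.startswith (PySem.Str.strip l) "- "
         then PySem.Str.strip (PySem.Str.slice (PySem.Str.strip l) (some 2) none)
         else PySem.Str.strip l)) s)

def parse_requires_sandboxes_from_markdown_py (content : String) : List String :=
  if PySem.Str.find content "## Requires Sandbox" < 0 then []
  else
    PySem.List.sorted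
      (pvA_loop
        (pvA_skip (PySem.Str.splitlines
          (PySem.Str.slice content
            (some (PySem.Str.find content "## Requires Sandbox" + PySem.Str.len "## Requires Sandbox")) none)))
        PySem.Set.empty)
      (fun x => x) false

-- ===== PORT B =====
-- the block loop: stripped lines up to (not including) the next section-header line, with list-bullet prefixes removed
def pvB_block : List String → List String
  | [] => []
  | raw :: rest =>
    if PySem.Str.startswith (PySem.Str.strip raw) "#" then []
    else (if PySem.Str.startswith (PySem.Str.strip raw) "- "
          then PySem.Str.strip (PySem.Str.slice (PySem.Str.strip raw) (some 2) none)
          else PySem.Str.strip raw) :: pvB_block rest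

-- the flattening comprehension building the token stream
def pvB_tokens (block : List String) : List String :=
  block.flatMap (fun s =>
    ((pvSplitComma s).map PySem.Str.strip).filter
      (fun t => !(t == "") && !(["none", "n/a", "na"].contains (PySem.Str.lower t))))

-- _insert_unique: recursive sorted insertion into a strictly increasing duplicate-free list
def pvInsertU (xs : List String) (t : String) : List String :=
  match xs with
  | [] => [t]
  | x :: rest =>
    if t < x then t :: x :: rest
    else if t == x then x :: rest
    else x :: pvInsertU rest t

def parse_requires_sandboxes_from_markdown_py_alt (content : String) : List String :=
  -- str.partition ported by hand: sep found ↔ find ≥ 0; `after` = the slice past the header (exact)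
  if PySem.Str.find content "## Requires Sandbox" < 0 then []
  else
    (pvB_tokens
      (pvB_block (PySem.Str.splitlines
        (PySem.Str.slice content
          (some (PySem.Str.find content "## Requires Sandbox" + PySem.Str.len "## Requires Sandbox")) none)))).foldl
      pvInsertU []

-- ===== PRECONDITION & SPEC =====
def Spec_parse_requires_sandboxes_from_markdown_py (content : String) (out : List String) : Prop := out = parse_requires_sandboxes_from_markdown_py_alt content
instance (content : String) (out : List String) : Decidable (Spec_parse_requires_sandboxes_from_markdown_py content out) := by unfold Spec_parse_requires_sandboxes_from_markdown_py; infer_instance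

-- ===== CLAIM (what is proved, stated in full; the proofs are below) =====
def Claim_equal_parse_requires_sandboxes_from_markdown_py : Prop := ∀ (content : String), Dom_parse_requires_sandboxes_from_markdown_py content → Spec_parse_requires_sandboxes_from_markdown_py content (parse_requires_sandboxes_from_markdown_py content)

-- ===== LEMMAS AND PROOFS =====
-- A's inner token loop = folding Set.add over the filtered, stripped token list
theorem pvA_inner_eq (toks : List String) (s : PySem.Set String) :
    pvA_inner toks s
      = ((toks.map PySem.Str.strip).filter
          (fun t => !(t == "") && !(["none", "n/a", "na"].contains (PySem.Str.lower t)))).foldl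
          PySem.Set.add s := by
  induction toks generalizing s with
  | nil => rfl
  | cons tok rest ih =>
    rw [List.map_cons, List.filter_cons]
    simp only [pvA_inner, List.foldl_cons] at *
    by_cases h1 : PySem.Str.strip tok = ""
    · have hp : (!(PySem.Str.strip tok == "")
          && !(["none", "n/a", "na"].contains (PySem.Str.lower (PySem.Str.strip tok)))) = false := by
        simp [h1]
      rw [if_pos h1, hp, ih]
      simp
    · rw [if_neg h1]
      cases hc : ["none", "n/a", "na"].contains (PySem.Str.lower (PySem.Str.strip tok)) with
      | true =>
        simp
        simp at ih
        exact ih s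
      | false =>
        simp [h1]
        simp at ih
        exact ih (PySem.Set.add s (PySem.Str.strip tok))

-- blank lines contribute no tokens on the token-stream side
theorem pvB_tokens_blank (rest : List String) :
    pvB_tokens ("" :: rest) = pvB_tokens rest := by
  simp only [pvB_tokens, List.flatMap_cons]
  have : (((pvSplitComma "").map PySem.Str.strip).filter
      (fun t => !(t == "") && !(["none", "n/a", "na"].contains (PySem.Str.lower t)))) = [] := by decide
  rw [this, List.nil_append]

-- A's main loop = folding Set.add over the token stream
theorem pvA_loop_eq (ls : List String) (s : PySem.Set String) :
    pvA_loop ls s = (pvB_tokens (pvB_block ls)).foldl PySem.Set.add s := by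
  induction ls generalizing s with
  | nil => rfl
  | cons l rest ih =>
    show (if PySem.Str.strip l = "" then pvA_loop rest s
      else if PySem.Str.startswith (PySem.Str.strip l) "#" then s
      else pvA_loop rest (pvA_inner (pvSplitComma
        (if PySem.Str.startswith (PySem.Str.strip l) "- "
         then PySem.Str.strip (PySem.Str.slice (PySem.Str.strip l) (some 2) none)
         else PySem.Str.strip l)) s))
      = (pvB_tokens (pvB_block (l :: rest))).foldl PySem.Set.add s
    by_cases hb : PySem.Str.strip l = ""
    · have hns : PySem.Str.startswith (PySem.Str.strip l) "#" = false := by rw [hb]; decide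
      have hnd : PySem.Str.startswith (PySem.Str.strip l) "- " = false := by rw [hb]; decide
      show _ = (pvB_tokens (if PySem.Str.startswith (PySem.Str.strip l) "#" then []
        else (if PySem.Str.startswith (PySem.Str.strip l) "- "
              then PySem.Str.strip (PySem.Str.slice (PySem.Str.strip l) (some 2) none)
              else PySem.Str.strip l) :: pvB_block rest)).foldl PySem.Set.add s
      rw [if_pos hb, hns, hnd]
      simp only [Bool.false_eq_true, if_false, hb, pvB_tokens_blank]
      exact ih s
    · show _ = (pvB_tokens (if PySem.Str.startswith (PySem.Str.strip l) "#" then []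
        else (if PySem.Str.startswith (PySem.Str.strip l) "- "
              then PySem.Str.strip (PySem.Str.slice (PySem.Str.strip l) (some 2) none)
              else PySem.Str.strip l) :: pvB_block rest)).foldl PySem.Set.add s
      rw [if_neg hb]
      by_cases hh : PySem.Str.startswith (PySem.Str.strip l) "#" = true
      · rw [if_pos hh, if_pos hh]
        rfl
      · rw [if_neg hh, if_neg hh, ih, pvA_inner_eq]
        simp only [pvB_tokens, List.flatMap_cons, List.foldl_append]

-- skipping leading blank lines does not change the loop's result
theorem pvA_loop_skip (ls : List String) (s : PySem.Set String) :
    pvA_loop (pvA_skip ls) s = pvA_loop ls s := by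
  induction ls with
  | nil => rfl
  | cons l rest ih =>
    by_cases hb : PySem.Str.strip l = ""
    · simp only [pvA_skip, if_pos hb, ih, pvA_loop]
    · simp only [pvA_skip, if_neg hb]

-- PySem.Set.empty is the empty association-free list (definitional)
theorem pvSetEmpty_eq_nil : (PySem.Set.empty : PySem.Set String) = [] := rfl

-- membership through one sorted insertion
theorem mem_pvInsertU (xs : List String) (t y : String) :
    y ∈ pvInsertU xs t ↔ y = t ∨ y ∈ xs := by
  induction xs with
  | nil => simp [pvInsertU]
  | cons x rest ih =>
    simp only [pvInsertU]
    split_ifs with h1 h2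
    · simp [List.mem_cons]
    · have : t = x := by simpa using h2
      subst this
      simp [List.mem_cons]
    · simp only [List.mem_cons, ih]
      tauto

-- sorted insertion preserves strict increase
theorem pairwise_pvInsertU (xs : List String) (t : String)
    (h : xs.Pairwise (· < ·)) : (pvInsertU xs t).Pairwise (· < ·) := by
  induction xs with
  | nil => simp [pvInsertU]
  | cons x rest ih =>
    rw [List.pairwise_cons] at h
    obtain ⟨hx, hrest⟩ := h
    simp only [pvInsertU]
    split_ifs with h1 h2
    · refine List.pairwise_cons.mpr ⟨?_, List.pairwise_cons.mpr ⟨hx, hrest⟩⟩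
      intro y hy
      rcases List.mem_cons.mp hy with rfl | hy
      · exact h1
      · exact lt_trans h1 (hx y hy)
    · exact List.pairwise_cons.mpr ⟨hx, hrest⟩
    · have hxt : x < t := by
        have : t ≠ x := by simpa using h2
        rcases lt_trichotomy t x with h | h | h
        · exact absurd h h1
        · exact absurd h this
        · exact h
      refine List.pairwise_cons.mpr ⟨?_, ih hrest⟩
      intro y hy
      rcases (mem_pvInsertU rest t y).mp hy with rfl | hy
      · exact hxt
      · exact hx y hy
-- membership through the insertion fold
theorem mem_foldl_pvInsertU (l : List String) (acc : List String) (y : String) :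
    y ∈ l.foldl pvInsertU acc ↔ y ∈ acc ∨ y ∈ l := by
  induction l generalizing acc with
  | nil => simp
  | cons t rest ih =>
    rw [List.foldl_cons, ih, mem_pvInsertU]
    simp [List.mem_cons]
    tauto

-- the insertion fold keeps the accumulator strictly increasing
theorem pairwise_foldl_pvInsertU (l : List String) (acc : List String)
    (h : acc.Pairwise (· < ·)) : (l.foldl pvInsertU acc).Pairwise (· < ·) := by
  induction l generalizing acc with
  | nil => exact h
  | cons t rest ih => exact ih _ (pairwise_pvInsertU _ _ h)

-- the insertion fold = sorted(set(tokens)): it is a strictly increasing permutation of the set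
theorem foldl_pvInsertU_eq_sorted_ofList (l : List String) :
    PySem.List.sorted (PySem.Set.ofList l) (fun x => x) false = l.foldl pvInsertU [] := by
  have hpw : (l.foldl pvInsertU []).Pairwise (· < ·) :=
    pairwise_foldl_pvInsertU l [] (by simp)
  have hnd : (l.foldl pvInsertU []).Nodup := hpw.imp (fun h => ne_of_lt h)
  have hperm : (l.foldl pvInsertU []).Perm (PySem.Set.ofList l) := by
    rw [List.perm_ext_iff_of_nodup hnd (PySem.Set.nodup_ofList l)]
    intro y
    rw [mem_foldl_pvInsertU, PySem.Set.mem_ofList]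
    simp
  exact PySem.List.sorted_eq_of_perm_of_pairwise_lt _ _ _ hperm hpw

-- ===== VERDICT (by name: the statement is the Claim_ definition above) =====
theorem parse_requires_sandboxes_from_markdown_py_spec : Claim_equal_parse_requires_sandboxes_from_markdown_py := by
  intro content _
  unfold Spec_parse_requires_sandboxes_from_markdown_py
  unfold parse_requires_sandboxes_from_markdown_py parse_requires_sandboxes_from_markdown_py_alt
  by_cases h : PySem.Str.find content "## Requires Sandbox" < 0
  · rw [if_pos h, if_pos h]
  · rw [if_neg h, if_neg h, pvA_loop_skip, pvA_loop_eq, pvSetEmpty_eq_nil,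
      ← PySem.Set.ofList_eq_foldl, foldl_pvInsertU_eq_sorted_ofList]
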